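-- pv_equiv track=rewrite | github.com/pypi-data/pypi-mirror-81 | packages/mistra/mistra-0.0.11.tar.gz/mistra-0.0.11/mistra/core/growing_arrays/support.py | chunked_slicing
-- ===== SOURCE A (Python) =====
-- def chunked_slicing(slice_start, slice_stop, chunk_size):
--     """
--     Iterator that yields, every time, a data structure like this:
--       - Current chunk index
--       - Start index in chunk
--       - Stop index in chunk
--       - Start index in source/destination
--       - Stop index in source/destination
--
--     It is guaranteed: 0 <= slice_start <= slice_stop <= logical length <= chunk_size * chunk_count.
--
--     The algorithm goes like this:
--       - Before: we know the starter bin, and the end bin.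
--     :param slice_start: The overall start.
--     :param slice_stop: The overall stop.
--     :param chunk_size: The chunk size.
--     :return: A generator.
--     """
--
--     start_chunk = slice_start // chunk_size
--     stop_chunk = slice_stop // chunk_size
--     if start_chunk == stop_chunk:
--         # This is the easiest case.
--         # The data indices will be 0 and stop_chunk - start_chunk.
--         # The chunk index will be start_chunk.
--         # the start index in chunk, and end index in chunk, will both involve modulo.
--         data_indices = (0, slice_stop - slice_start)
--         chunk_indices = (slice_start % chunk_size, slice_stop % chunk_size)
--         yield data_indices, start_chunk, chunk_indices
--     else:
--         # In this case, start chunk will always be lower than end chunk.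
--         chunk_start_index = slice_start % chunk_size
--         chunk_stop_index = slice_stop % chunk_size
--         first_iteration = True
--         data_index = 0
--         current_chunk = start_chunk
--         # We know that, in the first iteration:
--         # - chunk_start_index >= 0
--         # - start_chunk < stop_chunk, strictly
--         # And in further iterations:
--         # - chunk_start_index == 0
--         # - start_chunk <= stop_chunk
--         while True:
--             # The chunk upper bound will be:
--             # - The chunk stop index, if in last chunk.
--             # - The chunk size, otherwise.
--             if current_chunk == stop_chunk:
--                 # Another check here: if the chunk stop index is 0, just break.
--                 if chunk_stop_index == 0:
--                     return
--                 current_chunk_ubound = chunk_stop_index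
--             else:
--                 current_chunk_ubound = chunk_size
--             # The chunk lower bound will be:
--             # - The chunk start index, if in first chunk.
--             # - 0, otherwise.
--             if first_iteration:
--                 current_chunk_lbound = chunk_start_index
--             else:
--                 current_chunk_lbound = 0
--             # Now we know the chunk start and chunk end bounds.
--             # We also know the current chunk index.
--             # We also know the current data index.
--             # Also we can compute the current data length
--             length = current_chunk_ubound - current_chunk_lbound
--             # We can yield all the data now.
--             data_indices = (data_index, data_index + length)
--             chunk_indices = (current_chunk_lbound, current_chunk_ubound)
--             yield data_indices, current_chunk, chunk_indices
--             # If this is the last chunk, we must exit.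
--             if current_chunk == stop_chunk:
--                 return
--             # If not, then we move the data index and the current chunk.
--             current_chunk += 1
--             data_index += length
--             # Finish the first iteration.
--             first_iteration = False
-- ===== SOURCE B (Python) =====
-- def chunked_slicing(slice_start, slice_stop, chunk_size):
--     """Per-chunk ranges computed directly from the chunk number (no running
--     accumulator): chunk c covers [c*chunk_size, (c+1)*chunk_size), clipped to
--     [slice_start, slice_stop); a zero-length trailing chunk is simply not part
--     of the iterated range."""
--     start_chunk = slice_start // chunk_size
--     stop_chunk = slice_stop // chunk_size
--     last = stop_chunk
--     if start_chunk != stop_chunk and slice_stop % chunk_size == 0: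
--         last = stop_chunk - 1
--     for c in range(start_chunk, last + 1):
--         lo = slice_start if c == start_chunk else c * chunk_size
--         hi = slice_stop if c == stop_chunk else (c + 1) * chunk_size
--         yield (lo - slice_start, hi - slice_start), c, (lo - c * chunk_size, hi - c * chunk_size)
-- ===== Notes on version B (the rewrite author's own statement) =====
-- stated objective: simpler
-- what changed: Replaces A's same-chunk special case plus flag/accumulator while-loop with a single for-loop over the chunk range that computes each chunk's absolute bounds directly from the chunk number, eliminating the running data_index and first_iteration state.
import Mathlib
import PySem

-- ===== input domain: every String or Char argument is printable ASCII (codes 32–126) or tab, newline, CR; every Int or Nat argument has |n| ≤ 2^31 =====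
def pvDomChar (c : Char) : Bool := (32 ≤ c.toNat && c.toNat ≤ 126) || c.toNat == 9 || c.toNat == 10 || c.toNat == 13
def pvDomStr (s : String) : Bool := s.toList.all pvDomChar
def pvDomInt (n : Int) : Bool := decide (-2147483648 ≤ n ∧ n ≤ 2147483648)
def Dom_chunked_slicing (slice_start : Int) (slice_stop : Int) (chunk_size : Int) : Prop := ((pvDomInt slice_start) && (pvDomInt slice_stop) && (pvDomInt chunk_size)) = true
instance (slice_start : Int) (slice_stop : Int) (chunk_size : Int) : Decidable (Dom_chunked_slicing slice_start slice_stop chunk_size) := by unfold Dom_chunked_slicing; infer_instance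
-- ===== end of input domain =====

-- B replaces A's special case + flag/accumulator while-loop with one for-loop over the
-- chunk range computing absolute bounds per chunk directly (objective: simpler).
-- Both ports return the list of the generator's yields (return value only).

-- ===== PORT A =====
-- A's while-True loop; state (first_iteration, data_index, current_chunk).
-- The `else []` branch (current_chunk > stop_chunk) corresponds to Python's
-- non-termination and is excluded by Pre_; it only makes the recursion total.
def chunkedLoopA (stop_chunk chunk_size chunk_start_index chunk_stop_index : Int)
    (first_iteration : Bool) (data_index current_chunk : Int) :
    List ((Int × Int) × Int × (Int × Int)) :=
  if current_chunk = stop_chunk then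
    if chunk_stop_index = 0 then []
    else
      let ub := chunk_stop_index
      let lb := if first_iteration then chunk_start_index else 0
      let len := ub - lb
      [((data_index, data_index + len), current_chunk, (lb, ub))]
  else if _h : current_chunk < stop_chunk then
    let ub := chunk_size
    let lb := if first_iteration then chunk_start_index else 0
    let len := ub - lb
    ((data_index, data_index + len), current_chunk, (lb, ub)) ::
      chunkedLoopA stop_chunk chunk_size chunk_start_index chunk_stop_index false
        (data_index + len) (current_chunk + 1)
  else []
termination_by (stop_chunk - current_chunk).toNat
decreasing_by omega

def chunked_slicing (slice_start : Int) (slice_stop : Int) (chunk_size : Int) :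
    List ((Int × Int) × Int × (Int × Int)) :=
  let start_chunk := PySem.Int.floordiv slice_start chunk_size
  let stop_chunk := PySem.Int.floordiv slice_stop chunk_size
  if start_chunk = stop_chunk then
    [((0, slice_stop - slice_start), start_chunk,
      (PySem.Int.mod slice_start chunk_size, PySem.Int.mod slice_stop chunk_size))]
  else
    chunkedLoopA stop_chunk chunk_size (PySem.Int.mod slice_start chunk_size)
      (PySem.Int.mod slice_stop chunk_size) true 0 start_chunk

-- ===== PORT B =====
def chunked_slicing_alt (slice_start : Int) (slice_stop : Int) (chunk_size : Int) :
    List ((Int × Int) × Int × (Int × Int)) :=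
  let start_chunk := PySem.Int.floordiv slice_start chunk_size
  let stop_chunk := PySem.Int.floordiv slice_stop chunk_size
  let last := if start_chunk ≠ stop_chunk ∧ PySem.Int.mod slice_stop chunk_size = 0
              then stop_chunk - 1 else stop_chunk
  (PySem.List.pyRange start_chunk (last + 1) 1).map (fun c =>
    let lo := if c = start_chunk then slice_start else c * chunk_size
    let hi := if c = stop_chunk then slice_stop else (c + 1) * chunk_size
    ((lo - slice_start, hi - slice_start), c, (lo - c * chunk_size, hi - c * chunk_size)))

-- ===== PRECONDITION & SPEC =====
-- Pre_ excludes exactly where Python A does not return: chunk_size = 0 raises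
-- ZeroDivisionError, and start_chunk > stop_chunk makes A's while-loop diverge.
def Pre_chunked_slicing (slice_start : Int) (slice_stop : Int) (chunk_size : Int) : Prop :=
  chunk_size ≠ 0 ∧
    PySem.Int.floordiv slice_start chunk_size ≤ PySem.Int.floordiv slice_stop chunk_size
instance (slice_start : Int) (slice_stop : Int) (chunk_size : Int) : Decidable (Pre_chunked_slicing slice_start slice_stop chunk_size) := by unfold Pre_chunked_slicing; infer_instance

def pvWitness_chunked_slicing : Int × Int × Int := (3, 17, 5)

def Spec_chunked_slicing (slice_start : Int) (slice_stop : Int) (chunk_size : Int) (out : List ((Int × Int) × Int × (Int × Int))) : Prop := out = chunked_slicing_alt slice_start slice_stop chunk_size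
instance (slice_start : Int) (slice_stop : Int) (chunk_size : Int) (out : List ((Int × Int) × Int × (Int × Int))) : Decidable (Spec_chunked_slicing slice_start slice_stop chunk_size out) := by unfold Spec_chunked_slicing; infer_instance

-- ===== CLAIM (what is proved, stated in full; the proofs are below) =====
def Claim_equal_chunked_slicing : Prop := ∀ (slice_start : Int) (slice_stop : Int) (chunk_size : Int), Dom_chunked_slicing slice_start slice_stop chunk_size → Pre_chunked_slicing slice_start slice_stop chunk_size → Spec_chunked_slicing slice_start slice_stop chunk_size (chunked_slicing slice_start slice_stop chunk_size)

-- ===== LEMMAS AND PROOFS =====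

theorem pvIfFalse {a : Type} (x y : a) : (if (false : Bool) = true then x else y) = y := rfl
theorem pvIfTrue {a : Type} (x y : a) : (if (true : Bool) = true then x else y) = x := rfl

-- Invariant for the non-first iterations of A's loop: at chunk c (S < c ≤ T),
-- data_index = c*cs - ss, and the remaining yields are B's map over pyRange c..last.
theorem chunkedLoopA_inv (ss sp cs : Int) (hcs : cs ≠ 0)
    (c : Int) (hle : c ≤ PySem.Int.floordiv sp cs) :
    chunkedLoopA (PySem.Int.floordiv sp cs) cs (PySem.Int.mod ss cs) (PySem.Int.mod sp cs)
        false (c * cs - ss) c =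
      (PySem.List.pyRange c
        ((if PySem.Int.mod sp cs = 0 then PySem.Int.floordiv sp cs - 1
          else PySem.Int.floordiv sp cs) + 1) 1).map (fun k =>
        let lo := k * cs
        let hi := if k = PySem.Int.floordiv sp cs then sp else (k + 1) * cs
        ((lo - ss, hi - ss), k, (lo - k * cs, hi - k * cs))) := by
  have hsp : PySem.Int.floordiv sp cs * cs + PySem.Int.mod sp cs = sp :=
    PySem.Int.floordiv_mul_add_mod sp cs
  induction hn : (PySem.Int.floordiv sp cs - c).toNat generalizing c with
  | zero =>
    have hc : c = PySem.Int.floordiv sp cs := by omega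
    rw [hc]
    unfold chunkedLoopA
    by_cases hm : PySem.Int.mod sp cs = 0
    · rw [if_pos rfl, if_pos hm, hm,
        PySem.List.pyRange_one_eq_nil (by omega), List.map_nil]
    · rw [if_pos rfl, if_neg hm, if_neg hm,
        PySem.List.pyRange_one_cons (by omega),
        PySem.List.pyRange_one_eq_nil (le_refl _)]
      simp only [List.map_cons, List.map_nil, pvIfFalse, if_true]
      refine List.cons_eq_cons.mpr ⟨?_, rfl⟩
      simp only [Prod.mk.injEq, if_true]
      and_intros <;> first | trivial | linarith | (ring_nf; first | trivial | linarith)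
  | succ n ih =>
    have hlt : c < PySem.Int.floordiv sp cs := by omega
    unfold chunkedLoopA
    rw [if_neg (by omega), dif_pos hlt]
    rw [PySem.List.pyRange_one_cons (by
      by_cases hm : PySem.Int.mod sp cs = 0 <;> simp [hm] <;> omega)]
    simp only [List.map_cons, pvIfFalse,
      if_neg (show ¬ c = PySem.Int.floordiv sp cs by omega)]
    refine List.cons_eq_cons.mpr ⟨?_, ?_⟩
    · simp only [Prod.mk.injEq, if_true]
      and_intros <;> first | trivial | linarith | (ring_nf; first | trivial | linarith)
    · rw [show c * cs - ss + (cs - 0) = (c + 1) * cs - ss by ring]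
      exact ih (c + 1) (by omega) (by omega)

-- The first iteration of A's loop (lower bound = slice_start % chunk_size).
theorem chunkedLoopA_first (ss sp cs : Int) (hcs : cs ≠ 0)
    (hlt : PySem.Int.floordiv ss cs < PySem.Int.floordiv sp cs) :
    chunkedLoopA (PySem.Int.floordiv sp cs) cs (PySem.Int.mod ss cs) (PySem.Int.mod sp cs)
        true 0 (PySem.Int.floordiv ss cs) =
      (PySem.List.pyRange (PySem.Int.floordiv ss cs)
        ((if PySem.Int.mod sp cs = 0 then PySem.Int.floordiv sp cs - 1
          else PySem.Int.floordiv sp cs) + 1) 1).map (fun k =>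
        let lo := if k = PySem.Int.floordiv ss cs then ss else k * cs
        let hi := if k = PySem.Int.floordiv sp cs then sp else (k + 1) * cs
        ((lo - ss, hi - ss), k, (lo - k * cs, hi - k * cs))) := by
  have hss : PySem.Int.floordiv ss cs * cs + PySem.Int.mod ss cs = ss :=
    PySem.Int.floordiv_mul_add_mod ss cs
  unfold chunkedLoopA
  rw [if_neg (by omega), dif_pos hlt]
  rw [PySem.List.pyRange_one_cons (by
    by_cases hm : PySem.Int.mod sp cs = 0 <;> simp [hm] <;> omega)]
  simp only [List.map_cons, pvIfTrue, if_true, if_pos rfl,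
    if_neg (show ¬ PySem.Int.floordiv ss cs = PySem.Int.floordiv sp cs by omega)]
  refine List.cons_eq_cons.mpr ⟨?_, ?_⟩
  · simp only [Prod.mk.injEq, if_true]
    and_intros <;> first | trivial | linarith | (ring_nf; first | trivial | linarith)
  · rw [show (0 : Int) + (cs - PySem.Int.mod ss cs) =
        (PySem.Int.floordiv ss cs + 1) * cs - ss by ring_nf; linarith]
    rw [chunkedLoopA_inv ss sp cs hcs (PySem.Int.floordiv ss cs + 1) (by omega)]
    apply List.map_congr_left
    intro k hk
    have hkS : PySem.Int.floordiv ss cs + 1 ≤ k := (PySem.List.mem_pyRange_one.mp hk).1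
    simp only [if_neg (show ¬ k = PySem.Int.floordiv ss cs by omega)]

-- ===== VERDICT (by name: the statement is the Claim_ definition above) =====
theorem chunked_slicing_spec : Claim_equal_chunked_slicing := by
  intro ss sp cs _hdom hpre
  obtain ⟨hcs, hle⟩ := hpre
  unfold Spec_chunked_slicing chunked_slicing chunked_slicing_alt
  dsimp only
  by_cases hEq : PySem.Int.floordiv ss cs = PySem.Int.floordiv sp cs
  · -- same-chunk case
    have hss : PySem.Int.floordiv ss cs * cs + PySem.Int.mod ss cs = ss :=
      PySem.Int.floordiv_mul_add_mod ss cs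
    have hsp : PySem.Int.floordiv sp cs * cs + PySem.Int.mod sp cs = sp :=
      PySem.Int.floordiv_mul_add_mod sp cs
    rw [if_pos hEq, if_neg (show ¬ (PySem.Int.floordiv ss cs ≠ PySem.Int.floordiv sp cs
      ∧ PySem.Int.mod sp cs = 0) by intro h; exact h.1 hEq)]
    rw [PySem.List.pyRange_one_cons (by omega),
      PySem.List.pyRange_one_eq_nil (by omega)]
    simp only [List.map_cons, List.map_nil, if_pos rfl, if_pos hEq]
    refine List.cons_eq_cons.mpr ⟨?_, rfl⟩
    rw [← hEq] at hsp
    simp only [Prod.mk.injEq, if_true]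
    and_intros <;> first | trivial | linarith | (ring_nf; first | trivial | linarith)
  · -- multi-chunk case
    have hlt : PySem.Int.floordiv ss cs < PySem.Int.floordiv sp cs := lt_of_le_of_ne hle hEq
    rw [if_neg hEq]
    rw [chunkedLoopA_first ss sp cs hcs hlt]
    have hlast : (if PySem.Int.floordiv ss cs ≠ PySem.Int.floordiv sp cs
        ∧ PySem.Int.mod sp cs = 0 then PySem.Int.floordiv sp cs - 1
        else PySem.Int.floordiv sp cs) =
        (if PySem.Int.mod sp cs = 0 then PySem.Int.floordiv sp cs - 1
         else PySem.Int.floordiv sp cs) := by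
      by_cases hm : PySem.Int.mod sp cs = 0 <;> simp [hm, hEq]
    rw [hlast]
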